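-- pv_equiv track=rewrite | github.com/132nd-etcher/emiz | emiz/avwx/core.py | get_taf_alt_ice_turb
-- ===== SOURCE A (Python) =====
-- def get_taf_alt_ice_turb(wxdata: [str]) -> ([str], str, [str], [str]):  # type: ignore
--     """
--     Returns the report list and removed: Altimeter string, Icing list, Turbulance list
--     """
--     altimeter = ''
--     icing, turbulence = [], []
--     for i, item in reversed(list(enumerate(wxdata))):
--         if len(item) > 6 and item.startswith('QNH') and item[3:7].isdigit():
--             altimeter = wxdata.pop(i)[3:7]
--         elif item.isdigit():
--             if item[0] == '6':
--                 icing.append(wxdata.pop(i))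
--             elif item[0] == '5':
--                 turbulence.append(wxdata.pop(i))
--     return wxdata, altimeter, icing, turbulence
-- ===== SOURCE B (Python) =====
-- def get_taf_alt_ice_turb(wxdata):
--     altimeter = ''
--     kept, icing, turbulence = [], [], []
--     for item in wxdata:
--         if len(item) > 6 and item.startswith('QNH') and item[3:7].isdigit():
--             if not altimeter:
--                 altimeter = item[3:7]
--         elif item.isdigit() and item[0] == '6':
--             icing.append(item)
--         elif item.isdigit() and item[0] == '5':
--             turbulence.append(item)
--         else:
--             kept.append(item)
--     icing.reverse()
--     turbulence.reverse()
--     wxdata[:] = kept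
--     return wxdata, altimeter, icing, turbulence
-- ===== Notes on version B (the rewrite author's own statement) =====
-- stated objective: simpler
-- what changed: A iterates reversed(list(enumerate(wxdata))) and mutates the list via index-based pop(i); B does one forward pass that partitions tokens into kept/altimeter/icing/turbulence lists (first QNH code wins, icing/turbulence reversed at the end) and slice-assigns the kept list back.
import Mathlib
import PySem

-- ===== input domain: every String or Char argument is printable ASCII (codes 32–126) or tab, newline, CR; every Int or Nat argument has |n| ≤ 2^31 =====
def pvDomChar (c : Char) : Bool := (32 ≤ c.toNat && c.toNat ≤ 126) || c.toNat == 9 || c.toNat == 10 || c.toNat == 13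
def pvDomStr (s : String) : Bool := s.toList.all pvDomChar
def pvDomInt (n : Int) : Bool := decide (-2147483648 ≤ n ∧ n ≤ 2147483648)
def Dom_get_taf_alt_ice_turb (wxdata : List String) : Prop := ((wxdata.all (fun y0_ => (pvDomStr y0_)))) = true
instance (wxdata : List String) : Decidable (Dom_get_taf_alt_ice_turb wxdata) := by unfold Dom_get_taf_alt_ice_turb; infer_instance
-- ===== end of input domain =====

-- B replaces A's reversed-index loop with pops by a single forward partitioning pass (simpler); both
-- Pythons mutate wxdata in place the same way, and the equivalence proved here is about the return value.

-- ===== PORT A =====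
-- one step of A's 'for i, item in reversed(list(enumerate(wxdata)))' loop; state (wxdata, altimeter, icing, turbulence)
def getAltIceTurbStepA (st : List String × String × List String × List String)
    (p : Int × String) : List String × String × List String × List String :=
  match st, p with
  | (wx, alt, ic, tb), (i, item) =>
    if decide (PySem.Str.len item > 6) && PySem.Str.startswith item "QNH"
        && PySem.Str.strIsdigit (PySem.Str.slice item (some 3) (some 7)) then
      match PySem.List.pop? wx i with
      | some (v, wx') => (wx', PySem.Str.slice v (some 3) (some 7), ic, tb)
      | none => (wx, alt, ic, tb)
    else if PySem.Str.strIsdigit item then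
      if PySem.Str.pyGet? item 0 == some '6' then
        match PySem.List.pop? wx i with
        | some (v, wx') => (wx', alt, ic ++ [v], tb)
        | none => (wx, alt, ic, tb)
      else if PySem.Str.pyGet? item 0 == some '5' then
        match PySem.List.pop? wx i with
        | some (v, wx') => (wx', alt, ic, tb ++ [v])
        | none => (wx, alt, ic, tb)
      else (wx, alt, ic, tb)
    else (wx, alt, ic, tb)

def get_taf_alt_ice_turb (wxdata : List String) : List String × String × List String × List String :=
  ((PySem.List.enumerate wxdata).reverse).foldl getAltIceTurbStepA (wxdata, "", [], [])

-- ===== PORT B =====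
-- one step of B's forward pass; state (kept, altimeter, icing, turbulence)
def getAltIceTurbStepB (st : List String × String × List String × List String)
    (item : String) : List String × String × List String × List String :=
  match st with
  | (kept, alt, ic, tb) =>
    if decide (PySem.Str.len item > 6) && PySem.Str.startswith item "QNH"
        && PySem.Str.strIsdigit (PySem.Str.slice item (some 3) (some 7)) then
      (kept, if alt == "" then PySem.Str.slice item (some 3) (some 7) else alt, ic, tb)
    else if PySem.Str.strIsdigit item && (PySem.Str.pyGet? item 0 == some '6') then
      (kept, alt, ic ++ [item], tb)
    else if PySem.Str.strIsdigit item && (PySem.Str.pyGet? item 0 == some '5') then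
      (kept, alt, ic, tb ++ [item])
    else (kept ++ [item], alt, ic, tb)

def get_taf_alt_ice_turb_alt (wxdata : List String) : List String × String × List String × List String :=
  let r := wxdata.foldl getAltIceTurbStepB ([], "", [], [])
  (r.1, r.2.1, r.2.2.1.reverse, r.2.2.2.reverse)

-- ===== PRECONDITION & SPEC =====
def Spec_get_taf_alt_ice_turb (wxdata : List String) (out : List String × String × List String × List String) : Prop := out = get_taf_alt_ice_turb_alt wxdata
instance (wxdata : List String) (out : List String × String × List String × List String) : Decidable (Spec_get_taf_alt_ice_turb wxdata out) := by unfold Spec_get_taf_alt_ice_turb; infer_instance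

-- ===== CLAIM (what is proved, stated in full; the proofs are below) =====
def Claim_equal_get_taf_alt_ice_turb : Prop := ∀ (wxdata : List String), Dom_get_taf_alt_ice_turb wxdata → Spec_get_taf_alt_ice_turb wxdata (get_taf_alt_ice_turb wxdata)

-- ===== LEMMAS AND PROOFS =====

-- token classification (proof-side names for the branch conditions both ports test)
def pvIsQ (s : String) : Bool :=
  decide (PySem.Str.len s > 6) && PySem.Str.startswith s "QNH"
    && PySem.Str.strIsdigit (PySem.Str.slice s (some 3) (some 7))
def pvQCode (s : String) : String := PySem.Str.slice s (some 3) (some 7)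
def pvIsIce (s : String) : Bool :=
  !pvIsQ s && (PySem.Str.strIsdigit s && (PySem.Str.pyGet? s 0 == some '6'))
def pvIsTurb (s : String) : Bool :=
  !pvIsQ s && (PySem.Str.strIsdigit s && !(PySem.Str.pyGet? s 0 == some '6')
    && (PySem.Str.pyGet? s 0 == some '5'))
def pvKeep (s : String) : Bool := !pvIsQ s && !pvIsIce s && !pvIsTurb s

def pvFirstAlt (xs : List String) (alt : String) : String :=
  match xs.find? pvIsQ with
  | some q => pvQCode q
  | none => alt

lemma pvQCode_ne_empty (s : String) (h : pvIsQ s = true) : pvQCode s ≠ "" := by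
  intro he
  have h3 : PySem.Str.strIsdigit (pvQCode s) = true := by
    unfold pvIsQ at h
    simp only [Bool.and_eq_true] at h
    exact h.2
  rw [he] at h3
  exact absurd h3 (by decide)

lemma pop_at_mid (ys tail : List String) (z : String) :
    PySem.List.pop? (ys ++ z :: tail) (ys.length : Int) = some (z, ys ++ tail) := by
  rw [PySem.List.pop?_natCast _ _ (by simp)]
  congr 1
  refine Prod.ext ?_ ?_
  · simp
  · rw [List.eraseIdx_append_of_length_le (le_refl _)]
    simp

lemma firstAlt_append_singleton (ys : List String) (z : String) (a : String) :
    pvFirstAlt (ys ++ [z]) a = pvFirstAlt ys (if pvIsQ z then pvQCode z else a) := by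
  unfold pvFirstAlt
  rw [List.find?_append]
  cases hq : ys.find? pvIsQ with
  | some q => simp
  | none =>
    by_cases hzq : pvIsQ z = true
    · simp [hzq]
    · rw [List.find?_cons_of_neg hzq]
      simp [Bool.eq_false_iff.mpr hzq]

lemma A_inv (ys : List String) : ∀ (tail : List String) (alt : String) (ic tb : List String),
    ((PySem.List.enumerate ys).reverse).foldl getAltIceTurbStepA (ys ++ tail, alt, ic, tb)
      = (ys.filter pvKeep ++ tail, pvFirstAlt ys alt,
         ic ++ (ys.filter pvIsIce).reverse, tb ++ (ys.filter pvIsTurb).reverse) := by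
  induction ys using List.reverseRecOn with
  | nil =>
    intro tail alt ic tb
    simp [PySem.List.enumerate_nil, pvFirstAlt]
  | append_singleton ys z ih =>
    intro tail alt ic tb
    rw [PySem.List.enumerate_append]
    have henum : PySem.List.enumerate [z] ((0 : Int) + ys.length) = [((ys.length : Int), z)] := by
      simp [PySem.List.enumerate_cons, PySem.List.enumerate_nil]
    rw [henum, List.reverse_append, List.reverse_singleton, List.singleton_append, List.foldl_cons]
    rw [show ys ++ [z] ++ tail = ys ++ z :: tail by simp]
    by_cases hQ : pvIsQ z = true
    · -- QNH token: popped, altimeter set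
      have hcond : (decide (PySem.Str.len z > 6) && PySem.Str.startswith z "QNH"
          && PySem.Str.strIsdigit (PySem.Str.slice z (some 3) (some 7))) = true := hQ
      have hk : pvKeep z = false := by simp only [pvKeep, hQ, Bool.not_true, Bool.false_and]
      have hi : pvIsIce z = false := by simp only [pvIsIce, hQ, Bool.not_true, Bool.false_and]
      have ht : pvIsTurb z = false := by simp only [pvIsTurb, hQ, Bool.not_true, Bool.false_and]
      have hstep : getAltIceTurbStepA (ys ++ z :: tail, alt, ic, tb) ((ys.length : Int), z)
          = (ys ++ tail, pvQCode z, ic, tb) := by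
        simp only [getAltIceTurbStepA, pvQCode, hcond, if_true, pop_at_mid]
      rw [hstep, ih tail (pvQCode z) ic tb, firstAlt_append_singleton ys z alt]
      simp [hQ, hk, hi, ht, List.filter_append]
    · have hQf : pvIsQ z = false := Bool.eq_false_iff.mpr hQ
      have hcond : (decide (PySem.Str.len z > 6) && PySem.Str.startswith z "QNH"
          && PySem.Str.strIsdigit (PySem.Str.slice z (some 3) (some 7))) = false := hQf
      by_cases hd : PySem.Str.strIsdigit z = true
      · by_cases h6 : (PySem.Str.pyGet? z 0 == some '6') = true
        · -- icing token
          have hi : pvIsIce z = true := by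
            simp only [pvIsIce, hQf, hd, h6, Bool.not_false, Bool.and_self]
          have hk : pvKeep z = false := by
            simp only [pvKeep, hi, Bool.not_true, Bool.and_false, Bool.false_and]
          have ht : pvIsTurb z = false := by
            simp only [pvIsTurb, h6, Bool.not_true, Bool.and_false, Bool.false_and]
          have hstep : getAltIceTurbStepA (ys ++ z :: tail, alt, ic, tb) ((ys.length : Int), z)
              = (ys ++ tail, alt, ic ++ [z], tb) := by
            simp only [getAltIceTurbStepA, hcond, Bool.false_eq_true, if_false, hd, if_true,
              h6, pop_at_mid]
          rw [hstep, ih tail alt (ic ++ [z]) tb, firstAlt_append_singleton ys z alt]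
          simp [hQf, hk, hi, ht, List.filter_append]
        · by_cases h5 : (PySem.Str.pyGet? z 0 == some '5') = true
          · -- turbulence token
            have h6f : (PySem.Str.pyGet? z 0 == some '6') = false := Bool.eq_false_iff.mpr h6
            have ht : pvIsTurb z = true := by
              simp only [pvIsTurb, hQf, hd, h5, h6f, Bool.not_false,
                Bool.and_self]
            have hk : pvKeep z = false := by
              simp only [pvKeep, ht, Bool.not_true, Bool.and_false]
            have hi : pvIsIce z = false := by
              simp only [pvIsIce, h6f, Bool.and_false]
            have hstep : getAltIceTurbStepA (ys ++ z :: tail, alt, ic, tb) ((ys.length : Int), z)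
                = (ys ++ tail, alt, ic, tb ++ [z]) := by
              simp only [getAltIceTurbStepA, hcond, Bool.false_eq_true, if_false, hd, if_true,
                h6f, h5, pop_at_mid]
            rw [hstep, ih tail alt ic (tb ++ [z]), firstAlt_append_singleton ys z alt]
            simp [hQf, hk, hi, ht, List.filter_append]
          · -- kept digit token
            have h6f : (PySem.Str.pyGet? z 0 == some '6') = false := Bool.eq_false_iff.mpr h6
            have h5f : (PySem.Str.pyGet? z 0 == some '5') = false := Bool.eq_false_iff.mpr h5
            have hi : pvIsIce z = false := by
              simp only [pvIsIce, h6f, Bool.and_false]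
            have ht : pvIsTurb z = false := by
              simp only [pvIsTurb, h5f, Bool.and_false]
            have hk : pvKeep z = true := by
              simp only [pvKeep, hQf, hi, ht, Bool.not_false, Bool.and_self]
            have hstep : getAltIceTurbStepA (ys ++ z :: tail, alt, ic, tb) ((ys.length : Int), z)
                = (ys ++ z :: tail, alt, ic, tb) := by
              simp only [getAltIceTurbStepA, hcond, Bool.false_eq_true, if_false, hd, if_true,
                h6f, h5f]
            rw [hstep, show ys ++ z :: tail = ys ++ ([z] ++ tail) by simp,
              ih ([z] ++ tail) alt ic tb, firstAlt_append_singleton ys z alt]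
            simp [hQf, hk, hi, ht, List.filter_append]
      · -- kept non-digit token
        have hdf : PySem.Str.strIsdigit z = false := Bool.eq_false_iff.mpr hd
        have hi : pvIsIce z = false := by
          simp only [pvIsIce, hdf, Bool.false_and, Bool.and_false]
        have ht : pvIsTurb z = false := by
          simp only [pvIsTurb, hdf, Bool.false_and, Bool.and_false]
        have hk : pvKeep z = true := by
          simp only [pvKeep, hQf, hi, ht, Bool.not_false, Bool.and_self]
        have hstep : getAltIceTurbStepA (ys ++ z :: tail, alt, ic, tb) ((ys.length : Int), z)
            = (ys ++ z :: tail, alt, ic, tb) := by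
          simp only [getAltIceTurbStepA, hcond, Bool.false_eq_true, if_false, hdf]
        rw [hstep, show ys ++ z :: tail = ys ++ ([z] ++ tail) by simp,
          ih ([z] ++ tail) alt ic tb, firstAlt_append_singleton ys z alt]
        simp [hQf, hk, hi, ht, List.filter_append]

def pvAltB (alt : String) (xs : List String) : String :=
  if alt = "" then pvFirstAlt xs "" else alt

lemma B_inv (xs : List String) : ∀ (kept : List String) (alt : String) (ic tb : List String),
    xs.foldl getAltIceTurbStepB (kept, alt, ic, tb)
      = (kept ++ xs.filter pvKeep, pvAltB alt xs,
         ic ++ xs.filter pvIsIce, tb ++ xs.filter pvIsTurb) := by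
  induction xs with
  | nil => intro kept alt ic tb; simp [pvAltB, pvFirstAlt]
  | cons x xs ih =>
    intro kept alt ic tb
    rw [List.foldl_cons]
    by_cases hQ : pvIsQ x = true
    · have hcond : (decide (PySem.Str.len x > 6) && PySem.Str.startswith x "QNH"
          && PySem.Str.strIsdigit (PySem.Str.slice x (some 3) (some 7))) = true := hQ
      have hk : pvKeep x = false := by simp only [pvKeep, hQ, Bool.not_true, Bool.false_and]
      have hi : pvIsIce x = false := by simp only [pvIsIce, hQ, Bool.not_true, Bool.false_and]
      have ht : pvIsTurb x = false := by simp only [pvIsTurb, hQ, Bool.not_true, Bool.false_and]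
      by_cases he : alt = ""
      · have hstep : getAltIceTurbStepB (kept, alt, ic, tb) x = (kept, pvQCode x, ic, tb) := by
          simp only [getAltIceTurbStepB, pvQCode, hcond, if_true, he]
          rfl
        rw [hstep, ih]
        have hstay : pvAltB (pvQCode x) xs = pvQCode x := by
          simp only [pvAltB, if_neg (pvQCode_ne_empty x hQ)]
        have hhead : pvAltB alt (x :: xs) = pvQCode x := by
          simp only [pvAltB, if_pos he]
          unfold pvFirstAlt
          rw [List.find?_cons_of_pos hQ]
        rw [hstay, hhead]
        simp [hk, hi, ht]
      · have hstep : getAltIceTurbStepB (kept, alt, ic, tb) x = (kept, alt, ic, tb) := by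
          simp only [getAltIceTurbStepB, hcond, if_true, beq_eq_false_iff_ne.mpr he,
            Bool.false_eq_true, if_false]
        have hsame : pvAltB alt (x :: xs) = pvAltB alt xs := by
          simp only [pvAltB, if_neg he]
        rw [hstep, ih, hsame]
        simp [hk, hi, ht]
    · have hQf : pvIsQ x = false := Bool.eq_false_iff.mpr hQ
      have hcond : (decide (PySem.Str.len x > 6) && PySem.Str.startswith x "QNH"
          && PySem.Str.strIsdigit (PySem.Str.slice x (some 3) (some 7))) = false := hQf
      have hsame : pvAltB alt (x :: xs) = pvAltB alt xs := by
        unfold pvAltB pvFirstAlt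
        rw [List.find?_cons_of_neg hQ]
      by_cases h6 : (PySem.Str.strIsdigit x && (PySem.Str.pyGet? x 0 == some '6')) = true
      · rcases Bool.and_eq_true_iff.mp h6 with ⟨hd, h6'⟩
        have hi : pvIsIce x = true := by
          simp only [pvIsIce, hQf, hd, h6', Bool.not_false, Bool.and_self]
        have hk : pvKeep x = false := by
          simp only [pvKeep, hi, Bool.not_true, Bool.and_false, Bool.false_and]
        have ht : pvIsTurb x = false := by
          simp only [pvIsTurb, h6', Bool.not_true, Bool.and_false, Bool.false_and]
        have hstep : getAltIceTurbStepB (kept, alt, ic, tb) x = (kept, alt, ic ++ [x], tb) := by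
          simp only [getAltIceTurbStepB, hcond, Bool.false_eq_true, if_false, h6, if_true]
        rw [hstep, ih, hsame]
        simp [hk, hi, ht]
      · by_cases h5 : (PySem.Str.strIsdigit x && (PySem.Str.pyGet? x 0 == some '5')) = true
        · rcases Bool.and_eq_true_iff.mp h5 with ⟨hd, h5'⟩
          have h6' : (PySem.Str.pyGet? x 0 == some '6') = false := by
            rcases Bool.eq_false_or_eq_true (PySem.Str.pyGet? x 0 == some '6') with h | h
            · exact absurd (by rw [hd, h]; rfl) h6
            · exact h
          have h6f : (PySem.Str.strIsdigit x && (PySem.Str.pyGet? x 0 == some '6')) = false := by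
            simp only [h6', Bool.and_false]
          have ht : pvIsTurb x = true := by
            simp only [pvIsTurb, hQf, hd, h5', h6', Bool.not_false,
              Bool.and_self]
          have hk : pvKeep x = false := by
            simp only [pvKeep, ht, Bool.not_true, Bool.and_false]
          have hi : pvIsIce x = false := by
            simp only [pvIsIce, h6', Bool.and_false]
          have hstep : getAltIceTurbStepB (kept, alt, ic, tb) x = (kept, alt, ic, tb ++ [x]) := by
            simp only [getAltIceTurbStepB, hcond, Bool.false_eq_true, if_false, h6f, h5, if_true]
          rw [hstep, ih, hsame]
          simp [hk, hi, ht]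
        · have h6f : (PySem.Str.strIsdigit x && (PySem.Str.pyGet? x 0 == some '6')) = false :=
            Bool.eq_false_iff.mpr h6
          have h5f : (PySem.Str.strIsdigit x && (PySem.Str.pyGet? x 0 == some '5')) = false :=
            Bool.eq_false_iff.mpr h5
          have hi : pvIsIce x = false := by
            simp only [pvIsIce, hQf, Bool.not_false, Bool.true_and]
            exact h6f
          have ht : pvIsTurb x = false := by
            rcases Bool.eq_false_or_eq_true (PySem.Str.strIsdigit x) with hd | hd
            · have h5' : (PySem.Str.pyGet? x 0 == some '5') = false := by
                rcases Bool.eq_false_or_eq_true (PySem.Str.pyGet? x 0 == some '5') with h | h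
                · exact absurd (by rw [hd, h]; rfl) h5
                · exact h
              simp only [pvIsTurb, h5', Bool.and_false]
            · simp only [pvIsTurb, hd, Bool.false_and, Bool.and_false]
          have hk : pvKeep x = true := by
            simp only [pvKeep, hQf, hi, ht, Bool.not_false, Bool.and_self]
          have hstep : getAltIceTurbStepB (kept, alt, ic, tb) x = (kept ++ [x], alt, ic, tb) := by
            simp only [getAltIceTurbStepB, hcond, Bool.false_eq_true, if_false, h6f, h5f]
          rw [hstep, ih, hsame]
          simp [hk, hi, ht]

-- ===== VERDICT (by name: the statement is the Claim_ definition above) =====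
theorem get_taf_alt_ice_turb_spec : Claim_equal_get_taf_alt_ice_turb := by
  intro wxdata _
  unfold Spec_get_taf_alt_ice_turb get_taf_alt_ice_turb get_taf_alt_ice_turb_alt
  have hA := A_inv wxdata [] "" [] []
  rw [List.append_nil] at hA
  rw [hA]
  simp only [B_inv wxdata [] "" [] []]
  simp [pvAltB]
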